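-- pv_equiv track=rewrite | github.com/cs-course-stu/CS3245-NUS-HW4 | src/index.py | generate_court_field
-- ===== SOURCE A (Python) =====
-- COURT = "court"
--
-- def generate_court_field(dataset_dict):
--     """
--     Method to generate the postings list of documents for the court field. key is
--     court name and value is the list of documents that are in court.
--     """
--
--     # Store court as field
--     court_field_dict = {}
--
--     # For each document
--     for doc_key in dataset_dict:
--
--         # Get court name and make it key of court dict
--         court_name = dataset_dict[doc_key][COURT]
--
--         # Append doc_id in contents
--         if court_name not in court_field_dict:
--             court_field_dict[court_name] = list()
--         court_field_dict[court_name].append(doc_key)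
--
--     # sort doc ids in value
--     for key in court_field_dict:
--         court_field_dict[key] = sorted(court_field_dict[key])
--
--     return court_field_dict
-- ===== SOURCE B (Python) =====
-- COURT = "court"
--
-- def generate_court_field(dataset_dict):
--     """
--     Group doc ids by court name: build the key skeleton in first-occurrence
--     order, then fill all groups in one pass over the globally sorted doc keys,
--     so no per-group sort is needed.
--     """
--     court_field_dict = {dataset_dict[doc_key][COURT]: [] for doc_key in dataset_dict}
--     for doc_key in sorted(dataset_dict):
--         court_field_dict[dataset_dict[doc_key][COURT]].append(doc_key)
--     return court_field_dict
-- ===== Notes on version B (the rewrite author's own statement) =====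
-- stated objective: simpler
-- what changed: A groups doc ids per court and then sorts every group's list; B builds the per-court empty-group skeleton with a dict comprehension and fills all groups in a single pass over the globally sorted doc keys, so no per-group sorted() call is needed.
-- outside the precondition, e.g. on generate_court_field({'d1': {}}): A raises KeyError, B raises KeyError
import Mathlib
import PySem

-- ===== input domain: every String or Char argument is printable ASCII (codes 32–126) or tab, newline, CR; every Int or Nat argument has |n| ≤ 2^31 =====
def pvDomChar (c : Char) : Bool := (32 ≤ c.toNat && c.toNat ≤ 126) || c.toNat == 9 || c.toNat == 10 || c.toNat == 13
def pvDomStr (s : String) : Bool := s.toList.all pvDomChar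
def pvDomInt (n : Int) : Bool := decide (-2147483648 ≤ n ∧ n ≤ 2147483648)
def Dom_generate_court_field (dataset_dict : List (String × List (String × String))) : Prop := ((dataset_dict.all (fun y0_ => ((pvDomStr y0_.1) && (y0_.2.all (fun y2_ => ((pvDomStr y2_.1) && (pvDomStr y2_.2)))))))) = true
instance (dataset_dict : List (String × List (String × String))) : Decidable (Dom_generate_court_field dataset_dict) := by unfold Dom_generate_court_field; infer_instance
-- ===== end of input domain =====

-- B builds the per-court empty-group skeleton first, then fills all groups in one pass over the
-- globally sorted doc keys (no per-group sort), instead of A's group-then-sort-each-group.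


-- ===== PORT A =====
-- dataset_dict[doc_key][COURT]: look up doc_key in the outer dict, then "court" in the inner
-- dict (first-match association-list lookup). The `.getD` defaults are only reached where
-- Python raises KeyError; Pre_ excludes exactly those inputs.
def pvCourtOf (dataset_dict : List (String × List (String × String))) (doc_key : String) : String :=
  ((PySem.Dict.mk (((PySem.Dict.mk dataset_dict).get? doc_key).getD [])).get? "court").getD ""

-- A: group doc keys by court name (if absent, start with []; append), then sort each group.
def generate_court_field (dataset_dict : List (String × List (String × String))) : List (String × List String) :=
  let cfd : PySem.Dict String (List String) :=
    dataset_dict.foldl (fun d p =>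
      let court_name := pvCourtOf dataset_dict p.1
      let d1 := if d.contains court_name then d else d.insert court_name []
      d1.insert court_name (d1.getD court_name [] ++ [p.1])) PySem.Dict.empty
  let cfd2 := cfd.keys.foldl
      (fun d k => d.insert k (PySem.List.sorted (d.getD k []) (fun x => x))) cfd
  cfd2.items

-- ===== PORT B =====
-- B: a dict comprehension builds the per-court empty-group skeleton in first-occurrence order, then one
-- pass over the globally sorted doc keys appends each doc key to its court's group.
def generate_court_field_alt (dataset_dict : List (String × List (String × String))) : List (String × List String) :=
  let skel : PySem.Dict String (List String) :=
    dataset_dict.foldl (fun d p => d.insert (pvCourtOf dataset_dict p.1) []) PySem.Dict.empty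
  let res := (PySem.List.sorted (dataset_dict.map (·.1)) (fun x => x)).foldl
      (fun d k => d.insert (pvCourtOf dataset_dict k)
        (d.getD (pvCourtOf dataset_dict k) [] ++ [k])) skel
  res.items

-- ===== PRECONDITION & SPEC =====
-- Pre_ excludes (a) inner dicts with no "court" key, where A raises KeyError (so does B), and
-- (b) association lists with duplicate doc keys, which no Python dict argument can present
-- (a dict literal collapses the duplicates before A ever sees them).
def Pre_generate_court_field (dataset_dict : List (String × List (String × String))) : Prop :=
  (dataset_dict.map (·.1)).Nodup ∧
  ∀ p ∈ dataset_dict, (PySem.Dict.mk p.2).contains "court" = true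
instance (dataset_dict : List (String × List (String × String))) : Decidable (Pre_generate_court_field dataset_dict) := by unfold Pre_generate_court_field; infer_instance
def pvWitness_generate_court_field : (List (String × List (String × String))) :=
  [("d2", [("court", "C1")]), ("d1", [("court", "C2")]), ("d0", [("court", "C1")])]

def Spec_generate_court_field (dataset_dict : List (String × List (String × String))) (out : List (String × List String)) : Prop := out = generate_court_field_alt dataset_dict
instance (dataset_dict : List (String × List (String × String))) (out : List (String × List String)) : Decidable (Spec_generate_court_field dataset_dict out) := by unfold Spec_generate_court_field; infer_instance

-- ===== CLAIM (what is proved, stated in full; the proofs are below) =====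
def Claim_equal_generate_court_field : Prop := ∀ (dataset_dict : List (String × List (String × String))), Dom_generate_court_field dataset_dict → Pre_generate_court_field dataset_dict → Spec_generate_court_field dataset_dict (generate_court_field dataset_dict)

-- ===== LEMMAS AND PROOFS =====

-- A's "if absent, insert []; then append" body is exactly dict.modify with default [].
lemma pv_stepA_eq_modify (d : PySem.Dict String (List String)) (c x : String) :
    (let d1 := if d.contains c then d else d.insert c []
     d1.insert c (d1.getD c [] ++ [x])) = d.modify c [] (· ++ [x]) := by
  by_cases h : d.contains c = true
  · simp [h, PySem.Dict.modify]
  · have h' : d.contains c = false := by simp [h]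
    have hg : d.getD c [] = [] := PySem.Dict.getD_of_not_contains d [] h'
    simp only [h', Bool.false_eq_true, if_false, PySem.Dict.getD_insert_self, PySem.Dict.modify, hg]
    apply PySem.Dict.ext
    rw [PySem.Dict.items_insert_of_contains _ _ (PySem.Dict.contains_insert_self d c []),
        PySem.Dict.items_insert_of_not_contains _ _ h',
        PySem.Dict.items_insert_of_not_contains _ _ h']
    rw [List.map_append]
    have : ∀ p ∈ d.items, (if (p.1 == c) = true then (c, [] ++ [x]) else p) = p := by
      intro p hp
      have hne : p.1 ≠ c := by
        intro e
        exact absurd ((PySem.Dict.contains_iff_mem_keys d c).2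
          (e ▸ PySem.Dict.mem_keys_of_mem_items d hp)) h
      simp [hne]
    rw [List.map_congr_left this]
    simp

-- a dict with Nodup keys is the list of its (key, value-at-key) pairs
lemma pv_items_eq_map_keys (d : PySem.Dict String (List String)) (h : d.keys.Nodup) :
    d.items = d.keys.map (fun k => (k, d.getD k [])) := by
  simp only [PySem.Dict.keys, List.map_map]
  refine ((List.map_id d.items).symm).trans (List.map_congr_left ?_)
  intro p hp
  have : d.getD p.1 [] = p.2 := PySem.Dict.getD_of_mem_items d hp h []
  simp [Function.comp, this]

-- A's second loop (overwrite each existing key's value with g of it) maps g over the values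
lemma pv_resort_items (g : List String → List String) :
    ∀ (ks : List String) (d : PySem.Dict String (List String)), d.keys.Nodup → ks.Nodup →
    (∀ k ∈ ks, d.contains k = true) →
    (ks.foldl (fun a k => a.insert k (g (a.getD k []))) d).items
      = d.items.map (fun q => if q.1 ∈ ks then (q.1, g q.2) else q) := by
  intro ks
  induction ks with
  | nil => intro d _ _ _; simp
  | cons k t ih =>
    intro d hd hks hc
    have hck : d.contains k = true := hc k (by simp)
    have hstep : (d.insert k (g (d.getD k []))).items
        = d.items.map (fun q => if q.1 ∈ ([k] : List String) then (q.1, g q.2) else q) := by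
      rw [PySem.Dict.items_insert_of_contains _ _ hck]
      refine List.map_congr_left (fun p hp => ?_)
      by_cases e : p.1 = k
      · have : d.getD k [] = p.2 := by
          rw [← e]; exact PySem.Dict.getD_of_mem_items d hp hd []
        simp [e, this]
      · simp [e]
    set d' := d.insert k (g (d.getD k [])) with hd'
    have hkeys : d'.keys = d.keys := PySem.Dict.keys_insert_of_contains _ _ hck
    have h1 : d'.keys.Nodup := hkeys ▸ hd
    have h2 : ∀ k' ∈ t, d'.contains k' = true := by
      intro k' hk'
      rw [PySem.Dict.contains_insert]
      simp [hc k' (by simp [hk'])]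
    rw [List.foldl_cons, ih d' h1 hks.of_cons h2, hstep, List.map_map]
    refine List.map_congr_left (fun p hp => ?_)
    have hknt : k ∉ t := (List.nodup_cons.1 hks).1
    by_cases e : p.1 = k
    · simp [Function.comp, e, hknt]
    · by_cases e2 : p.1 ∈ t <;> simp [Function.comp, e, e2]

-- B's skeleton stores [] at every key
lemma pv_skel_getD (f : String × List (String × String) → String) :
    ∀ (l : List (String × List (String × String))) (d : PySem.Dict String (List String)),
    (∀ c, d.getD c [] = []) → ∀ c,
    (l.foldl (fun d p => d.insert (f p) []) d).getD c [] = [] := by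
  intro l
  induction l with
  | nil => intro d hd c; exact hd c
  | cons p t ih =>
    intro d hd c
    refine ih _ (fun c' => ?_) c
    rw [PySem.Dict.getD_insert]
    split <;> simp [hd c']

-- Set.update adds nothing when every element is already present
lemma pv_set_update_of_subset : ∀ (l s : List String), (∀ x ∈ l, x ∈ s) →
    PySem.Set.update s l = s := by
  intro l
  induction l with
  | nil => intro s _; rfl
  | cons x t ih =>
    intro s hs
    simp only [PySem.Set.update, List.foldl_cons]
    rw [PySem.Set.add_of_mem (hs x (by simp))]
    exact ih s (fun y hy => hs y (by simp [hy]))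

-- filtering commutes with sorting a duplicate-free list of strings
lemma pv_filter_sorted (ks : List String) (hks : ks.Nodup) (p : String → Bool) :
    PySem.List.sorted (ks.filter p) (fun x => x)
      = (PySem.List.sorted ks (fun x => x)).filter p := by
  have hperm : ((PySem.List.sorted ks (fun x => x)).filter p).Perm (ks.filter p) :=
    (PySem.List.sorted_perm ks (fun x => x) false).filter p
  have hsorted : (PySem.List.sorted ks (fun x => x)).Pairwise (· < ·) := by
    have hle : (PySem.List.sorted ks (fun x => x)).Pairwise (fun a b => a ≤ b) :=
      PySem.List.sorted_pairwise ks (fun x => x)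
    have hnd : (PySem.List.sorted ks (fun x => x)).Nodup :=
      ((PySem.List.sorted_perm ks (fun x => x) false).nodup_iff).2 hks
    exact (hle.and hnd).imp (fun h => lt_of_le_of_ne h.1 h.2)
  exact PySem.List.sorted_eq_of_perm_of_pairwise_lt _ _ _ hperm
    (hsorted.sublist (List.filter_sublist))

-- A, characterised: keys in first-occurrence order of the courts; value at c = the
-- sorted list of doc keys whose court is c
lemma pv_A_char (dd : List (String × List (String × String))) :
    generate_court_field dd
      = (PySem.Set.ofList ((dd.map (·.1)).map (pvCourtOf dd))).map
          (fun c => (c, PySem.List.sorted ((dd.map (·.1)).filter (fun k => pvCourtOf dd k == c)) (fun x => x))) := by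
  unfold generate_court_field
  have hfun : (fun (d : PySem.Dict String (List String)) (p : String × List (String × String)) =>
      let court_name := pvCourtOf dd p.1
      let d1 := if d.contains court_name then d else d.insert court_name []
      d1.insert court_name (d1.getD court_name [] ++ [p.1]))
      = fun d p => d.modify (pvCourtOf dd p.1) [] (· ++ [p.1]) :=
    funext fun d => funext fun p => pv_stepA_eq_modify d _ _
  rw [hfun]
  set cfd := dd.foldl (fun d p => d.modify (pvCourtOf dd p.1) [] (· ++ [p.1])) PySem.Dict.empty with hcfd
  have hkeys : cfd.keys = PySem.Set.ofList ((dd.map (·.1)).map (pvCourtOf dd)) := by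
    rw [hcfd, PySem.Dict.keys_foldl_modify_key dd (fun p => pvCourtOf dd p.1)
      ([] : List String) (fun _ p => (· ++ [p.1])) PySem.Dict.empty]
    simp [PySem.Dict.keys_empty, PySem.Set.update, PySem.Set.ofList_eq_foldl, List.map_map,
      Function.comp_def]
  have hnodup : cfd.keys.Nodup := by rw [hkeys]; exact PySem.Set.nodup_ofList _
  have hgetD : ∀ c, cfd.getD c [] = (dd.map (·.1)).filter (fun k => pvCourtOf dd k == c) := by
    intro c
    have hfold : cfd = (dd.map (fun p => (pvCourtOf dd p.1, p.1))).foldl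
        (fun d q => d.modify q.1 [] (· ++ [q.2])) PySem.Dict.empty := by
      rw [hcfd, List.foldl_map]
    rw [hfold, PySem.Dict.getD_foldl_modify_append]
    simp [List.filter_map, List.map_map, Function.comp_def]
  rw [pv_resort_items (fun v => PySem.List.sorted v (fun x => x)) cfd.keys cfd hnodup hnodup
    (fun k hk => (PySem.Dict.contains_iff_mem_keys cfd k).2 hk)]
  rw [pv_items_eq_map_keys cfd hnodup, List.map_map]
  rw [hkeys]
  refine List.map_congr_left (fun c hc => ?_)
  simp only [Function.comp_def, hgetD c]
  simp
  intro h'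
  have hnil : List.filter (fun k => pvCourtOf dd k == c) (dd.map (·.1)) = [] := by
    refine List.filter_eq_nil_iff.2 (fun k hk => ?_)
    rcases List.mem_map.1 hk with ⟨p, hp, rfl⟩
    simpa using h' p.1 p.2 hp
  simp only [hnil] at *
  rfl

-- B, characterised: same keys in the same order; value at c = the sorted doc-key pass
-- restricted to court c
lemma pv_B_char (dd : List (String × List (String × String))) :
    generate_court_field_alt dd
      = (PySem.Set.ofList ((dd.map (·.1)).map (pvCourtOf dd))).map
          (fun c => (c, (PySem.List.sorted (dd.map (·.1)) (fun x => x)).filter (fun k => pvCourtOf dd k == c))) := by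
  unfold generate_court_field_alt
  set S := PySem.List.sorted (dd.map (·.1)) (fun x => x) with hS
  set skel := dd.foldl (fun d p => d.insert (pvCourtOf dd p.1) []) PySem.Dict.empty with hskel
  have hskelkeys : skel.keys = PySem.Set.ofList ((dd.map (·.1)).map (pvCourtOf dd)) := by
    rw [hskel, PySem.Dict.keys_foldl_insert_key dd (fun p => pvCourtOf dd p.1)
      (fun _ _ => []) PySem.Dict.empty]
    simp [PySem.Dict.keys_empty, PySem.Set.update, PySem.Set.ofList_eq_foldl, List.map_map,
      Function.comp_def]
  have hskelgetD : ∀ c, skel.getD c [] = [] :=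
    pv_skel_getD (fun p => pvCourtOf dd p.1) dd PySem.Dict.empty
      (fun c => PySem.Dict.getD_empty c [])
  have hfun : (fun (d : PySem.Dict String (List String)) (k : String) =>
      d.insert (pvCourtOf dd k) (d.getD (pvCourtOf dd k) [] ++ [k]))
      = fun d k => d.modify (pvCourtOf dd k) [] (· ++ [k]) := rfl
  rw [hfun]
  set res := S.foldl (fun d k => d.modify (pvCourtOf dd k) [] (· ++ [k])) skel with hres
  have hkeys : res.keys = PySem.Set.ofList ((dd.map (·.1)).map (pvCourtOf dd)) := by
    rw [hres, PySem.Dict.keys_foldl_modify_key S (fun k => pvCourtOf dd k)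
      ([] : List String) (fun _ k => (· ++ [k])) skel, hskelkeys]
    refine pv_set_update_of_subset _ _ (fun x hx => ?_)
    rcases List.mem_map.1 hx with ⟨k, hk, rfl⟩
    have : k ∈ dd.map (·.1) :=
      (PySem.List.sorted_perm (dd.map (·.1)) (fun x => x) false).subset (hS ▸ hk)
    exact (PySem.Set.mem_ofList _ _).2 (List.mem_map_of_mem this)
  have hnodup : res.keys.Nodup := by rw [hkeys]; exact PySem.Set.nodup_ofList _
  have hgetD : ∀ c, res.getD c [] = S.filter (fun k => pvCourtOf dd k == c) := by
    intro c
    have hfold : res = (S.map (fun k => (pvCourtOf dd k, k))).foldl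
        (fun d q => d.modify q.1 [] (· ++ [q.2])) skel := by
      rw [hres, List.foldl_map]
    rw [hfold, PySem.Dict.getD_foldl_modify_append, hskelgetD c]
    simp [List.filter_map, List.map_map, Function.comp_def]
  rw [pv_items_eq_map_keys res hnodup, hkeys]
  exact List.map_congr_left (fun c _hc => by rw [hgetD c])

-- ===== VERDICT (by name: the statement is the Claim_ definition above) =====
theorem generate_court_field_spec : Claim_equal_generate_court_field := by
  intro dd _hdom hpre
  unfold Spec_generate_court_field
  rw [pv_A_char dd, pv_B_char dd]
  refine List.map_congr_left (fun c _hc => ?_)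
  rw [pv_filter_sorted (dd.map (·.1)) hpre.1]
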